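-- pv_equiv track=rewrite | github.com/tjddn5242/Algorithm | Beak_jun/1dim_arr/8958.py | answer
-- ===== SOURCE A (Python) =====
-- def answer(L):
--   rep=[]
--   count=0
--   for l in L:
--     if l=='X':
--       count=0
--       rep.append(count)
--     else:
--       count+=1
--       rep.append(count)
--   return (sum(rep))
-- ===== SOURCE B (Python) =====
-- def answer(L):
--     total = 0
--     i = 0
--     n = len(L)
--     while i < n:
--         j = i
--         while j < n and L[j] != 'X':
--             j += 1
--         k = j - i
--         total += k * (k + 1) // 2
--         i = j + 1
--     return total
-- ===== Notes on version B (the rewrite author's own statement) =====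
-- stated objective: alternative
-- what changed: B scans for maximal runs of non-'X' elements with two indices and adds each run's closed-form triangular number k*(k+1)//2, instead of A's per-element streak counter appended to a list that is summed at the end.
import Mathlib
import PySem

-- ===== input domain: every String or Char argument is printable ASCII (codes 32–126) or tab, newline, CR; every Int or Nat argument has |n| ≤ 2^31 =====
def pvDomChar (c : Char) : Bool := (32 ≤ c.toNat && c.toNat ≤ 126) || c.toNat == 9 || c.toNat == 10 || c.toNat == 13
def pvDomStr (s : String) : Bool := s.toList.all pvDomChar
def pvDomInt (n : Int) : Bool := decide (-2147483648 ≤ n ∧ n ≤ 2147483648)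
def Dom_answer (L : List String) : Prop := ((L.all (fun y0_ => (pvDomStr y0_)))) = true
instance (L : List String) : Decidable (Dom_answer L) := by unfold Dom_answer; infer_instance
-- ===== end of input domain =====

-- B replaces A's per-element streak counter (list of counts, summed) with a two-index
-- scan over maximal non-'X' runs, adding each run's triangular number in closed form
-- (objective: alternative; same O(n) cost).

-- ===== PORT A =====
-- for l in L: append 0 and reset on 'X', else increment and append; return sum(rep)
def answer (L : List String) : Int :=
  let st := L.foldl
    (fun (s : List Int × Int) l =>
      if l = "X" then (s.1 ++ [0], 0) else (s.1 ++ [s.2 + 1], s.2 + 1))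
    ([], 0)
  st.1.sum

-- ===== PORT B =====
-- inner while: advance j while j < n and L[j] != 'X'  (j, i are Nat: in Source B they are
-- ints that stay ≥ 0 throughout)
def answerRunEnd (L : List String) (j : Nat) : Nat :=
  if h : j < L.length then
    if L[j] = "X" then j else answerRunEnd L (j + 1)
  else j
termination_by L.length - j

theorem answerRunEnd_ge (L : List String) (j : Nat) : j ≤ answerRunEnd L j := by
  unfold answerRunEnd
  split
  · split
    · exact le_refl _
    · exact le_trans (Nat.le_succ j) (answerRunEnd_ge L (j + 1))
  · exact le_refl _
termination_by L.length - j

-- outer while over i; k = j - i; total += k*(k+1)//2; i = j + 1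
def answerLoop (L : List String) (i : Nat) : Int :=
  if _h : i < L.length then
    let j := answerRunEnd L i
    let k : Int := (j : Int) - (i : Int)
    k * (k + 1) / 2 + answerLoop L (j + 1)
  else 0
termination_by L.length - i
decreasing_by
  have := answerRunEnd_ge L i
  omega

def answer_alt (L : List String) : Int := answerLoop L 0

-- ===== PRECONDITION & SPEC =====
def Spec_answer (L : List String) (out : Int) : Prop := out = answer_alt L
instance (L : List String) (out : Int) : Decidable (Spec_answer L out) := by unfold Spec_answer; infer_instance

-- ===== CLAIM (what is proved, stated in full; the proofs are below) =====
def Claim_equal_answer : Prop := ∀ (L : List String), Dom_answer L → Spec_answer L (answer L)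

-- ===== LEMMAS AND PROOFS =====

-- sum of the values A appends while scanning L, starting from counter c
def gA (L : List String) (c : Int) : Int :=
  match L with
  | [] => 0
  | l :: r => if l = "X" then gA r 0 else (c + 1) + gA r (c + 1)

theorem answer_foldl_sum (L : List String) (rep : List Int) (c : Int) :
    ((L.foldl
      (fun (s : List Int × Int) l =>
        if l = "X" then (s.1 ++ [0], 0) else (s.1 ++ [s.2 + 1], s.2 + 1))
      (rep, c)).1).sum = rep.sum + gA L c := by
  induction L generalizing rep c with
  | nil => simp [gA]
  | cons l r ih =>
      by_cases hl : l = "X" <;>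
        simp [gA, hl, List.foldl_cons, ih, List.sum_append]; ring

theorem answer_eq_gA (L : List String) : answer L = gA L 0 := by
  have := answer_foldl_sum L [] 0
  simpa [answer] using this

-- triangular identity used when extending a run by one element
theorem tri_step (c k : Int) :
    (c + 1) + ((k - 1) * (c + 1) + (k - 1) * k / 2) = k * c + k * (k + 1) / 2 := by
  obtain ⟨m, hm⟩ : ∃ m, k * (k + 1) = 2 * m := by
    rcases Int.even_or_odd k with ⟨t, ht⟩ | ⟨t, ht⟩
    · exact ⟨t * (k + 1), by rw [ht]; ring⟩
    · exact ⟨k * (t + 1), by rw [ht]; ring⟩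
  have hm' : (k - 1) * k = 2 * (m - k) := by nlinarith [hm]
  rw [hm, hm', Int.mul_ediv_cancel_left _ (by norm_num), Int.mul_ediv_cancel_left _ (by norm_num)]
  ring

-- runEnd never passes the length
theorem answerRunEnd_le (L : List String) (j : Nat) (h : j ≤ L.length) :
    answerRunEnd L j ≤ L.length := by
  rw [answerRunEnd]
  split
  · split
    · omega
    · exact answerRunEnd_le L (j + 1) (by omega)
  · omega
termination_by L.length - j

-- core invariant: gA on the suffix from i, counter c, equals k·c + triangular(k) for the
-- current run of length k = runEnd - i, plus gA restarted after the run's terminating 'X'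
theorem gA_run (L : List String) (i : Nat) (c : Int) (hi : i ≤ L.length) :
    gA (L.drop i) c =
      ((answerRunEnd L i : Int) - i) * c
        + ((answerRunEnd L i : Int) - i) * (((answerRunEnd L i : Int) - i) + 1) / 2
        + gA (L.drop (answerRunEnd L i + 1)) 0 := by
  by_cases h : i < L.length
  · rw [List.drop_eq_getElem_cons h]
    by_cases hx : L[i] = "X"
    · have hi' : answerRunEnd L i = i := by rw [answerRunEnd]; simp [h, hx]
      rw [hi']
      simp [gA, hx]
    · have hrec : answerRunEnd L i = answerRunEnd L (i + 1) := by
        rw [answerRunEnd]; simp [h, hx]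
      have hge : i + 1 ≤ answerRunEnd L (i + 1) := answerRunEnd_ge L (i + 1)
      have ih := gA_run L (i + 1) (c + 1) h
      rw [hrec]
      simp only [gA, hx, if_neg, not_false_iff]
      rw [ih]
      have ht := tri_step c ((answerRunEnd L (i + 1) : Int) - i)
      have e1 : ((answerRunEnd L (i + 1) : Int) - (↑i + 1)) * (c + 1)
          = ((answerRunEnd L (i + 1) : Int) - ↑i - 1) * (c + 1) := by ring
      have e2 : ((answerRunEnd L (i + 1) : Int) - (↑i + 1))
            * (((answerRunEnd L (i + 1) : Int) - (↑i + 1)) + 1)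
          = ((answerRunEnd L (i + 1) : Int) - ↑i - 1) * ((answerRunEnd L (i + 1) : Int) - ↑i) := by
        ring
      push_cast
      push_cast at ht e1 e2
      rw [e1, e2]
      linarith [ht]
  · have hend : i = L.length := by omega
    subst hend
    have he : answerRunEnd L L.length = L.length := by rw [answerRunEnd]; simp
    have hd : L.drop (L.length + 1) = [] := List.drop_eq_nil_of_le (by omega)
    simp [he, hd, gA]
termination_by L.length - i
decreasing_by omega

theorem loop_eq_gA (L : List String) (i : Nat) : answerLoop L i = gA (L.drop i) 0 := by
  rw [answerLoop]
  by_cases h : i < L.length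
  · have hrun := gA_run L i 0 (le_of_lt h)
    have hrec := loop_eq_gA L (answerRunEnd L i + 1)
    simp only [h, dif_pos]
    rw [hrec, hrun]
    ring_nf
  · have hnil : L.drop i = [] := List.drop_eq_nil_of_le (by omega)
    simp [h, hnil, gA]
termination_by L.length - i
decreasing_by have := answerRunEnd_ge L i; omega

theorem answer_spec' : ∀ (L : List String), answer L = answer_alt L := by
  intro L
  rw [answer_eq_gA, answer_alt, loop_eq_gA L 0]
  simp

-- ===== VERDICT (by name: the statement is the Claim_ definition above) =====
theorem answer_spec : Claim_equal_answer := by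
  intro L _
  unfold Spec_answer
  exact answer_spec' L
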